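-- pv_equiv track=rewrite | github.com/Karagul/Doc2VecStockPredictionNLP | doc2vec_encode.py | clean_headline
-- ===== SOURCE A (Python) =====
-- def clean_headline(text_list):
--     """
--     Pre-processing the data
--     1. cut stock quotes
--     2. cut special alphabets
--     3. change to lower
--
--     input variable : text_list --> list/series/array of string
--     input type : list/series/array-like
--     return list/series/array-like of cleaning data
--     """
--     wantToChange = ['\\\\','..','--'] #ลบตัวที่ไม่ต้องการทิ้ง
--     memory = []
--     text_list_change = []
--     for x in text_list:
--         word = x
--         if ('{' in word):
--             wordSplit = word.split('{')
--             CreateWord = ''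
--             for y in range(len(wordSplit)-1):
--                 if CreateWord == '' and len(CreateWord.split('}')) != 1:
--                     CreateWord = CreateWord + wordSplit[0] + wordSplit[1].split('}')[1]
--                 elif len(CreateWord.split('}')) != 1:
--                     CreateWord = CreateWord.split('{')[0]+CreateWord.split('}')[1]
--                 else:
--                     CreateWord = CreateWord.split('{')[0]
--
--             word = CreateWord
--         if '(' in word:
--             wordSplit = word.split('(')
--             CreateWord = ''
--             for y in range(len(wordSplit)-1):
--                 if CreateWord == '' and len(CreateWord.split(')')) != 1:
--                     CreateWord = CreateWord + wordSplit[0] + wordSplit[1].split(')')[1]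
--                 elif len(CreateWord.split(')')) != 1:
--                     CreateWord = CreateWord.split('(')[0]+CreateWord.split(')')[1]
--                 else:
--                     CreateWord = CreateWord.split('(')[0]
--
--             word = CreateWord
--         if '<' in word:
--             wordSplit = word.split('<')
--             CreateWord = ''
--             # try:
--             for y in range(len(wordSplit)-1):
--                 if CreateWord == '' and len(CreateWord.split('>')) != 1:
--                     CreateWord = CreateWord + wordSplit[0] + wordSplit[1].split('>')[1]
--                 elif len(CreateWord.split('>')) != 1:
--                     CreateWord = CreateWord.split('<')[0]+CreateWord.split('>')[1]
--                 else:
--                     CreateWord = CreateWord.split('<')[0]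
--
--             word = CreateWord
--
--         if '- Part' in word:
--             word = word.split('- Part')[0]
--
--         for a in range(len(wantToChange)):
--             if wantToChange[a] in word:
--                 word = word.replace(wantToChange[a],'')
--
--         while '  ' in word:
--             word = word.replace('  ',' ')
--
--         if ' ' in word:
--             if word[0] == ' ':
--                 word = word[1:]
--
--         word = word.lower()
--
--         if word != "" and word not in memory :
--             text_list_change.append(word)
--             if len(memory) > 5:
--                 del memory[0]
--             memory.append(word)
--
--     return text_list_change
-- ===== SOURCE B (Python) =====
-- def _clean_word(word):
--     # headlines containing any bracket character are dropped (A's bracket loops always yield '')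
--     if any(c in word for c in '{(<'):
--         return ''
--     if '- Part' in word:
--         word = word.split('- Part')[0]
--     word = word.replace('\\\\', '').replace('..', '').replace('--', '')
--     # collapse runs of spaces in one pass
--     out = []
--     prev = ''
--     for c in word:
--         if c != ' ' or prev != ' ':
--             out.append(c)
--         prev = c
--     word = ''.join(out)
--     if word.startswith(' '):
--         word = word[1:]
--     return word.lower()
--
--
-- def clean_headline(text_list):
--     result = []
--     memory = []
--     for x in text_list:
--         word = _clean_word(x)
--         if word and word not in memory:
--             result.append(word)
--             memory = (memory + [word])[-6:]
--     return result
-- ===== Notes on version B (the rewrite author's own statement) =====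
-- stated objective: simpler
-- what changed: A's three nested bracket-splitting loops always produce the empty string whenever '{', '(' or '<' occurs, so B replaces them with a single guard that drops such headlines; the guarded indexed replace loop becomes chained replaces, the repeated replace(' ',' ') while-loop becomes one left-to-right pass, and the 6-slot dedup window becomes a slice.
import Mathlib
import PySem

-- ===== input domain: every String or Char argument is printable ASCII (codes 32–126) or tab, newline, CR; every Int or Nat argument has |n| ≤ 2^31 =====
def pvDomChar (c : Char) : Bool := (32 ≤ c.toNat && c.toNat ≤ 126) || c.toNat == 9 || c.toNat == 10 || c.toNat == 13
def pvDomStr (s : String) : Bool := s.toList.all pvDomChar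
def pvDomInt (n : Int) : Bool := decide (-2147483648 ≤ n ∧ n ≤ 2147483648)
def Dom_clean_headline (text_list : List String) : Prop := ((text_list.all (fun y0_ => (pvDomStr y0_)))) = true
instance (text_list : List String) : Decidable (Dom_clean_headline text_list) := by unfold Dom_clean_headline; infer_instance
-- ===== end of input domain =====

-- B simplifies A: A's three dead bracket loops (which always yield '') become one guard that
-- drops bracketed headlines, the guarded indexed replace loop becomes chained replaces, the
-- while-replace space collapse becomes one pass, and the 6-slot dedup window becomes a slice.

-- ===== PORT A =====
-- s.split(sep); every call site passes a non-empty literal sep, where split? is exact (never none)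
def pySplit (s sep : String) : List String := (PySem.Str.split? s sep).getD [s]

-- one 'if bracket in word: wordSplit = …; CreateWord = ''; for y in range(len(wordSplit)-1): …' block of A
def bracketStep (op cl word : String) : String :=
  let wordSplit := pySplit word op
  (PySem.List.pyRange 0 ((wordSplit.length : Int) - 1) 1).foldl
    (fun CreateWord _y =>
      if CreateWord = "" ∧ (pySplit CreateWord cl).length ≠ 1 then
        CreateWord ++ PySem.List.pyGetD wordSplit 0 "" ++
          PySem.List.pyGetD (pySplit (PySem.List.pyGetD wordSplit 1 "") cl) 1 ""
      else if (pySplit CreateWord cl).length ≠ 1 then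
        PySem.List.pyGetD (pySplit CreateWord op) 0 "" ++
          PySem.List.pyGetD (pySplit CreateWord cl) 1 ""
      else
        PySem.List.pyGetD (pySplit CreateWord op) 0 "")
    ""

-- the three bracket blocks of A, in order
def brkA (x : String) : String :=
  let word := x
  let word := if PySem.Str.isIn "{" word then bracketStep "{" "}" word else word
  let word := if PySem.Str.isIn "(" word then bracketStep "(" ")" word else word
  if PySem.Str.isIn "<" word then bracketStep "<" ">" word else word

def wantToChange : List String := ["\\\\", "..", "--"]

-- "while '  ' in word: word = word.replace('  ',' ')"; fuel = len word is a totality guard only: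
-- each iteration strictly shortens the string, so the fuel never runs out
def collapseA : Nat → String → String
  | 0, word => word
  | fuel + 1, word =>
    if PySem.Str.isIn "  " word then collapseA fuel (PySem.Str.replace word "  " " ") else word

-- "if '- Part' in word: word = word.split('- Part')[0]"
def partA (word : String) : String :=
  if PySem.Str.isIn "- Part" word then PySem.List.pyGetD (pySplit word "- Part") 0 "" else word

-- "for a in range(len(wantToChange)): if wantToChange[a] in word: word = word.replace(...)"
def replA (word : String) : String :=
  (PySem.List.pyRange 0 (wantToChange.length : Int) 1).foldl
    (fun word a =>
      if PySem.Str.isIn (PySem.List.pyGetD wantToChange a "") word then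
        PySem.Str.replace word (PySem.List.pyGetD wantToChange a "") ""
      else word) word

-- "if ' ' in word: if word[0] == ' ': word = word[1:]"
def stripA (word : String) : String :=
  if PySem.Str.isIn " " word then
    (if PySem.Str.pyGet? word 0 = some ' ' then PySem.Str.slice word (some 1) none else word)
  else word

-- A's loop body after the bracket blocks: '- Part' cut, wantToChange removals, space collapse,
-- guarded leading-space strip, lower()
def restA (word : String) : String :=
  let word := partA word
  let word := replA word
  let word := collapseA word.toList.length word
  let word := stripA word
  PySem.Str.lower word

def cleanA (x : String) : String := restA (brkA x)

-- A's loop body: st = (memory, text_list_change)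
def loopA (st : List String × List String) (x : String) : List String × List String :=
  let word := cleanA x
  if word ≠ "" ∧ word ∉ st.1 then
    -- 'if len(memory) > 5: del memory[0]' then 'memory.append(word)' ; del memory[0] = tail
    (if st.1.length > 5 then st.1.tail ++ [word] else st.1 ++ [word], st.2 ++ [word])
  else st

def clean_headline (text_list : List String) : List String :=
  (text_list.foldl loopA ([], [])).2

-- ===== PORT B =====
-- the one-pass space collapse of Source B (out/prev loop, then ''.join)
def squeezeB (word : String) : String :=
  String.ofList
    ((word.toList.foldl
        (fun (st : List Char × Option Char) c =>
          (if c ≠ ' ' ∨ st.2 ≠ some ' ' then st.1 ++ [c] else st.1, some c))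
        ([], none)).1)

def partB (word : String) : String :=
  if PySem.Str.isIn "- Part" word then PySem.List.pyGetD (pySplit word "- Part") 0 "" else word

-- the chained .replace calls of Source B
def replB (word : String) : String :=
  PySem.Str.replace (PySem.Str.replace (PySem.Str.replace word "\\\\" "") ".." "") "--" ""

def stripB (word : String) : String :=
  if PySem.Str.startswith word " " then PySem.Str.slice word (some 1) none else word

-- _clean_word after the bracket guard
def restB (word : String) : String :=
  let word := partB word
  let word := replB word
  let word := squeezeB word
  let word := stripB word
  PySem.Str.lower word

def cleanB (word : String) : String :=
  if ["{", "(", "<"].any (fun c => PySem.Str.isIn c word) then "" else restB word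

-- B's loop body: st = (memory, result); memory = (memory + [word])[-6:]
def loopB (st : List String × List String) (x : String) : List String × List String :=
  let word := cleanB x
  if word ≠ "" ∧ word ∉ st.1 then
    (PySem.List.slice (st.1 ++ [word]) (some (-6)) none, st.2 ++ [word])
  else st

def clean_headline_alt (text_list : List String) : List String :=
  (text_list.foldl loopB ([], [])).2

-- ===== PRECONDITION & SPEC =====
def Spec_clean_headline (text_list : List String) (out : List String) : Prop := out = clean_headline_alt text_list
instance (text_list : List String) (out : List String) : Decidable (Spec_clean_headline text_list out) := by unfold Spec_clean_headline; infer_instance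

-- ===== CLAIM (what is proved, stated in full; the proofs are below) =====
def Claim_equal_clean_headline : Prop := ∀ (text_list : List String), Dom_clean_headline text_list → Spec_clean_headline text_list (clean_headline text_list)

-- ===== LEMMAS AND PROOFS =====

-- `rep old new l` = Python l.replace(old, new) for old ≠ [], as a clean structural recursion
def rep (old new : List Char) : List Char → List Char
  | [] => []
  | c :: t =>
    if _h : old ≠ [] ∧ old.isPrefixOf (c :: t) then
      new ++ rep old new ((c :: t).drop old.length)
    else
      c :: rep old new t
termination_by l => l.length
decreasing_by
  · simp only [List.length_drop, List.length_cons]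
    have h1 : old ≠ [] := _h.1
    have h2 : 1 ≤ old.length := by
      cases old with
      | nil => simp at h1
      | cons a b => simp
    omega
  · simp

theorem go_eq_rep (old new : List Char) (hold : old ≠ []) :
    ∀ fuel l acc, l.length ≤ fuel →
      PySem.Chars.replace.go old new fuel l acc = acc.reverse ++ rep old new l := by
  have hol : 1 ≤ old.length := by
    cases old with
    | nil => simp at hold
    | cons a b => simp
  intro fuel
  induction fuel with
  | zero =>
    intro l acc h
    have hl : l = [] := List.eq_nil_of_length_eq_zero (Nat.le_zero.mp h)
    subst hl
    simp [PySem.Chars.replace.go, rep]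
  | succ fuel ih =>
    intro l acc h
    cases l with
    | nil => simp [PySem.Chars.replace.go, rep]
    | cons c t =>
      rw [PySem.Chars.replace.go]
      by_cases hp : old.isPrefixOf (c :: t)
      · rw [if_pos hp]
        rw [ih ((c :: t).drop old.length) (new.reverse ++ acc)
            (by simp only [List.length_drop, List.length_cons]; simp at h; omega)]
        rw [rep, dif_pos ⟨hold, hp⟩]
        simp
      · rw [if_neg hp]
        rw [ih t (c :: acc) (by simp at h ⊢; omega)]
        rw [rep, dif_neg (by intro hc; exact hp hc.2)]
        simp

theorem replace_eq_rep (old new l : List Char) (hold : old ≠ []) :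
    PySem.Chars.replace l old new = rep old new l := by
  have he : old.isEmpty = false := by simpa using hold
  rw [PySem.Chars.replace, he]
  simpa using go_eq_rep old new hold l.length l [] (le_refl _)

theorem rep_of_not_infix (old new l : List Char) (h : ¬ old <:+: l) :
    rep old new l = l := by
  induction l with
  | nil => simp [rep]
  | cons c t ih =>
    have hp : ¬ old.isPrefixOf (c :: t) := by
      intro hp
      exact h (List.isPrefixOf_iff_prefix.mp hp).isInfix
    rw [rep, dif_neg (by intro hc; exact hp hc.2)]
    rw [ih (by intro hi; exact h (List.infix_cons hi))]

-- guarded replace of A = unguarded replace of B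
theorem guard_replace (w old new : String) (hold : old ≠ "") :
    (if PySem.Str.isIn old w then PySem.Str.replace w old new else w) = PySem.Str.replace w old new := by
  by_cases hin : PySem.Str.isIn old w = true
  · rw [if_pos hin]
  · rw [if_neg (by simpa using hin)]
    have holdL : old.toList ≠ [] := by
      intro hc
      exact hold (by rw [← String.toList_inj, hc]; rfl)
    have hni : ¬ old.toList <:+: w.toList := by
      intro hi
      exact hin ((PySem.Str.isIn_iff_infix old w).mpr hi)
    rw [← String.toList_inj]
    rw [PySem.Str.toList_replace, replace_eq_rep _ _ _ holdL, rep_of_not_infix _ _ _ hni]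

-- the per-character space squeezer, list level
def sqz : Bool → List Char → List Char
  | _, [] => []
  | b, c :: t => if (c == ' ') && b then sqz true t else c :: sqz (c == ' ') t

theorem sqz_id : ∀ l : List Char, ¬ ([' ', ' '] <:+: l) →
    sqz false l = l ∧ (l.head? ≠ some ' ' → sqz true l = l) := by
  intro l
  induction l with
  | nil => intro _; exact ⟨rfl, fun _ => rfl⟩
  | cons c t ih =>
    intro h
    have hp : ¬ ([' ', ' '] <+: c :: t) := fun a => h a.isInfix
    have ht : ¬ ([' ', ' '] <:+: t) := fun a => h (List.infix_cons a)
    have hrec : sqz (c == ' ') t = t := by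
      by_cases hc : c = ' '
      · subst hc
        have hh : t.head? ≠ some ' ' := by
          intro hh
          cases t with
          | nil => simp at hh
          | cons d u =>
            simp at hh
            subst hh
            exact hp ⟨u, rfl⟩
        rw [show ((' ' : Char) == ' ') = true from by decide]
        exact (ih ht).2 hh
      · rw [show (c == ' ') = false from by simp [hc]]
        exact (ih ht).1
    constructor
    · rw [show sqz false (c :: t) = c :: sqz (c == ' ') t from by rw [sqz]; simp, hrec]
    · intro hh
      have hc : (c == ' ') = false := by
        simp only [beq_eq_false_iff_ne, ne_eq]
        intro hc; subst hc; simp at hh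
      rw [show sqz true (c :: t) = c :: sqz (c == ' ') t from by rw [sqz]; simp [hc], hrec]

theorem rep_sp_len_le : ∀ n (l : List Char), l.length ≤ n →
    (rep [' ', ' '] [' '] l).length ≤ l.length := by
  intro n
  induction n with
  | zero =>
    intro l h
    have : l = [] := List.eq_nil_of_length_eq_zero (Nat.le_zero.mp h)
    subst this; simp [rep]
  | succ n ih =>
    intro l h
    cases l with
    | nil => simp [rep]
    | cons c t =>
      by_cases hp : ([' ', ' '] : List Char).isPrefixOf (c :: t)
      · obtain ⟨r, hr⟩ := List.isPrefixOf_iff_prefix.mp hp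
        simp at hr
        obtain ⟨hc, hrt⟩ := hr
        subst hc
        subst hrt
        rw [rep, dif_pos ⟨by simp, hp⟩]
        have hru : (rep [' ', ' '] [' '] r).length ≤ r.length := by
          apply ih
          simp at h; omega
        simp at h ⊢
        omega
      · rw [rep, dif_neg (by intro hc; exact hp hc.2)]
        have := ih t (by simp at h; omega)
        simp at h ⊢
        omega

theorem rep_sp_len_lt : ∀ n (l : List Char), l.length ≤ n → [' ', ' '] <:+: l →
    (rep [' ', ' '] [' '] l).length < l.length := by
  intro n
  induction n with
  | zero =>
    intro l h hin
    have : l = [] := List.eq_nil_of_length_eq_zero (Nat.le_zero.mp h)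
    subst this; simp at hin
  | succ n ih =>
    intro l h hin
    cases l with
    | nil => simp at hin
    | cons c t =>
      by_cases hp : ([' ', ' '] : List Char).isPrefixOf (c :: t)
      · obtain ⟨r, hr⟩ := List.isPrefixOf_iff_prefix.mp hp
        simp at hr
        obtain ⟨hc, hrt⟩ := hr
        subst hc
        subst hrt
        rw [rep, dif_pos ⟨by simp, hp⟩]
        have hru : (rep [' ', ' '] [' '] r).length ≤ r.length :=
          rep_sp_len_le n r (by simp at h; omega)
        simp at h ⊢
        omega
      · have htin : [' ', ' '] <:+: t := by
          rcases List.infix_cons_iff.mp hin with hpre | hsub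
          · exact absurd (List.isPrefixOf_iff_prefix.mpr hpre) hp
          · exact hsub
        rw [rep, dif_neg (by intro hc; exact hp hc.2)]
        have := ih t (by simp at h; omega) htin
        simp
        omega

theorem sqz_rep : ∀ n (l : List Char) b, l.length ≤ n →
    sqz b (rep [' ', ' '] [' '] l) = sqz b l := by
  intro n
  induction n with
  | zero =>
    intro l b h
    have : l = [] := List.eq_nil_of_length_eq_zero (Nat.le_zero.mp h)
    subst this; simp [rep]
  | succ n ih =>
    intro l b h
    cases l with
    | nil => simp [rep]
    | cons c t =>
      by_cases hp : ([' ', ' '] : List Char).isPrefixOf (c :: t)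
      · obtain ⟨r, hr⟩ := List.isPrefixOf_iff_prefix.mp hp
        simp at hr
        obtain ⟨hc, hrt⟩ := hr
        subst hc
        subst hrt
        rw [rep, dif_pos ⟨by simp, hp⟩]
        have hlen : r.length ≤ n := by simp at h; omega
        cases b with
        | true => simp [sqz, ih r true hlen]
        | false => simp [sqz, ih r true hlen]
      · rw [rep, dif_neg (by intro hc; exact hp hc.2)]
        have hlen : t.length ≤ n := by simp at h; omega
        by_cases hcb : ((c == ' ') && b) = true
        · simp only [sqz, if_pos hcb]
          exact ih t true hlen
        · simp only [sqz, if_neg hcb]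
          rw [ih t (c == ' ') hlen]

theorem collapseA_toList : ∀ fuel w, w.toList.length ≤ fuel →
    (collapseA fuel w).toList = sqz false w.toList := by
  intro fuel
  induction fuel with
  | zero =>
    intro w h
    have : w.toList = [] := List.eq_nil_of_length_eq_zero (Nat.le_zero.mp h)
    rw [collapseA, this]
    rfl
  | succ fuel ih =>
    intro w h
    rw [collapseA]
    by_cases hin : PySem.Str.isIn "  " w = true
    · rw [if_pos hin]
      have hinf : [' ', ' '] <:+: w.toList := by
        have := (PySem.Str.isIn_iff_infix "  " w).mp hin
        simpa using this
      have htl : (PySem.Str.replace w "  " " ").toList = rep [' ', ' '] [' '] w.toList := by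
        rw [PySem.Str.toList_replace]
        have : ("  " : String).toList = [' ', ' '] := by decide
        rw [this]
        have : (" " : String).toList = [' '] := by decide
        rw [this]
        exact replace_eq_rep _ _ _ (by simp)
      have hlt : (PySem.Str.replace w "  " " ").toList.length < w.toList.length := by
        rw [htl]
        exact rep_sp_len_lt w.toList.length w.toList (le_refl _) hinf
      rw [ih _ (by omega), htl, sqz_rep w.toList.length w.toList false (le_refl _)]
    · rw [if_neg (by simpa using hin)]
      have hni : ¬ ([' ', ' '] <:+: w.toList) := by
        intro hi
        apply hin
        apply (PySem.Str.isIn_iff_infix "  " w).mpr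
        simpa using hi
      exact (sqz_id w.toList hni).1.symm

theorem sqzB_fold : ∀ (l : List Char) (acc : List Char) (p : Option Char),
    (l.foldl
        (fun (st : List Char × Option Char) c =>
          (if c ≠ ' ' ∨ st.2 ≠ some ' ' then st.1 ++ [c] else st.1, some c))
        (acc, p)).1
      = acc ++ sqz (p == some ' ') l := by
  intro l
  induction l with
  | nil => intro acc p; simp [sqz]
  | cons c t ih =>
    intro acc p
    simp only [List.foldl_cons]
    by_cases hc : c = ' ' ∧ p = some ' '
    · obtain ⟨hc1, hc2⟩ := hc
      subst hc1; subst hc2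
      rw [show (if (' ' : Char) ≠ ' ' ∨ (some ' ' : Option Char) ≠ some ' '
            then acc ++ [' '] else acc, some ' ') = ((acc, some ' ') : List Char × Option Char)
          from by simp]
      rw [ih acc (some ' ')]
      rw [show sqz ((some ' ' : Option Char) == some ' ') (' ' :: t) = sqz true t
          from by rw [sqz]; simp]
      simp
    · rw [if_pos (by tauto)]
      rw [ih (acc ++ [c]) (some c)]
      have hcb : ((c == ' ') && (p == some ' ')) = false := by
        rcases not_and_or.mp hc with h1 | h1 <;> simp [h1]
      rw [show sqz (p == some ' ') (c :: t) = c :: sqz (c == ' ') t from by rw [sqz]; simp [hcb]]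
      simp

theorem squeezeB_toList (w : String) : (squeezeB w).toList = sqz false w.toList := by
  rw [squeezeB]
  rw [show ∀ l : List Char, (String.ofList l).toList = l from fun l => by simp]
  rw [sqzB_fold w.toList [] none]
  simp

theorem collapseA_eq_squeezeB (w : String) : collapseA w.toList.length w = squeezeB w := by
  rw [← String.toList_inj]
  rw [collapseA_toList _ w (le_refl _), squeezeB_toList]

theorem strip_eq (w : String) :
    (if PySem.Str.isIn " " w then
        (if PySem.Str.pyGet? w 0 = some ' ' then PySem.Str.slice w (some 1) none else w)
      else w) =
    (if PySem.Str.startswith w " " then PySem.Str.slice w (some 1) none else w) := by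
  by_cases hsw : PySem.Str.startswith w " " = true
  · have hcs : PySem.Chars.startswith w.toList (" " : String).toList = true := by
      rw [← PySem.Str.startswith_eq]; exact hsw
    have hpre : (" " : String).toList <+: w.toList := (PySem.Chars.startswith_iff _ _).mp hcs
    obtain ⟨t, ht⟩ := hpre
    have htl : w.toList = ' ' :: t := by rw [← ht]; rfl
    have hin : PySem.Str.isIn " " w = true := by
      apply (PySem.Str.isIn_iff_infix " " w).mpr
      exact List.IsPrefix.isInfix ⟨t, ht⟩
    have hget : PySem.Str.pyGet? w 0 = some ' ' := by
      have : PySem.Str.pyGet? w ((0 : Nat) : Int) = w.toList[(0 : Nat)]? := PySem.Str.pyGet?_natCast w 0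
      simp only [Nat.cast_zero] at this
      rw [this, htl]
      rfl
    rw [if_pos hsw, if_pos hin, if_pos hget]
  · rw [if_neg hsw]
    by_cases hin : PySem.Str.isIn " " w = true
    · rw [if_pos hin]
      have hget : ¬ (PySem.Str.pyGet? w 0 = some ' ') := by
        intro hg
        apply hsw
        have hg0 : w.toList[(0 : Nat)]? = some ' ' := by
          have : PySem.Str.pyGet? w ((0 : Nat) : Int) = w.toList[(0 : Nat)]? := PySem.Str.pyGet?_natCast w 0
          simp only [Nat.cast_zero] at this
          rw [← this]; exact hg
        cases hw : w.toList with
        | nil => rw [hw] at hg0; simp at hg0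
        | cons c t =>
          rw [hw] at hg0
          simp at hg0
          subst hg0
          rw [PySem.Str.startswith_eq]
          apply (PySem.Chars.startswith_iff _ _).mpr
          rw [hw]
          exact ⟨t, rfl⟩
      rw [if_neg hget]
    · rw [if_neg hin]

theorem foldl_const_str {α : Type} (f : String → α → String) (h : ∀ y, f "" y = "") :
    ∀ l : List α, l.foldl f "" = "" := by
  intro l
  induction l with
  | nil => rfl
  | cons x t ih => rw [List.foldl_cons, h x, ih]

theorem bracketStep_empty (op cl w : String)
    (h1 : pySplit "" cl = [""]) (h2 : pySplit "" op = [""]) :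
    bracketStep op cl w = "" := by
  rw [bracketStep]
  apply foldl_const_str
  intro y
  simp only [h1, h2]
  rw [if_neg (show ¬(True ∧ ([("" : String)] : List String).length ≠ 1) from by simp),
      if_neg (show ¬(([("" : String)] : List String).length ≠ 1) from by simp)]
  decide

theorem restA_empty : restA "" = "" := by decide

theorem replA_eq (s : String) : replA s = replB s := by
  rw [replA, replB]
  rw [show PySem.List.pyRange 0 ((wantToChange.length : Nat) : Int) 1 = [0, 1, 2] from by decide]
  rw [List.foldl_cons, List.foldl_cons, List.foldl_cons, List.foldl_nil]
  rw [show PySem.List.pyGetD wantToChange (0 : Int) "" = "\\\\" from by decide,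
      show PySem.List.pyGetD wantToChange (1 : Int) "" = ".." from by decide,
      show PySem.List.pyGetD wantToChange (2 : Int) "" = "--" from by decide]
  rw [guard_replace _ _ _ (by decide), guard_replace _ _ _ (by decide),
      guard_replace _ _ _ (by decide)]

theorem stripA_eq (s : String) : stripA s = stripB s := by
  rw [stripA, stripB]
  exact strip_eq s

theorem restA_eq_restB (w : String) : restA w = restB w := by
  simp only [restA, restB]
  rw [show partB w = partA w from rfl, replA_eq (partA w),
      collapseA_eq_squeezeB (replB (partA w)), stripA_eq (squeezeB (replB (partA w)))]

theorem clean_eq (x : String) : cleanA x = cleanB x := by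
  have hP : PySem.Str.isIn "(" "" = false := by decide
  have hL : PySem.Str.isIn "<" "" = false := by decide
  have hnft : ¬ ((false : Bool) = true) := by decide
  have hT : (true : Bool) = true := rfl
  by_cases h1 : PySem.Str.isIn "{" x = true
  · have hbrk : brkA x = "" := by
      simp only [brkA]
      rw [if_pos h1, bracketStep_empty _ _ _ (by decide) (by decide), hP, if_neg hnft, hL,
          if_neg hnft]
    have hany : (["{", "(", "<"].any (fun c => PySem.Str.isIn c x)) = true := by
      simp only [List.any_cons, List.any_nil, h1, Bool.true_or, Bool.or_false]
    rw [cleanA, cleanB, hbrk, restA_empty, hany, if_pos hT]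
  · have h1' : PySem.Str.isIn "{" x = false := by
      revert h1; cases PySem.Str.isIn "{" x <;> simp
    by_cases h2 : PySem.Str.isIn "(" x = true
    · have hbrk : brkA x = "" := by
        simp only [brkA]
        rw [h1', if_neg hnft, if_pos h2, bracketStep_empty _ _ _ (by decide) (by decide), hL,
            if_neg hnft]
      have hany : (["{", "(", "<"].any (fun c => PySem.Str.isIn c x)) = true := by
        simp only [List.any_cons, List.any_nil, h2, Bool.true_or, Bool.or_true, Bool.or_false]
      rw [cleanA, cleanB, hbrk, restA_empty, hany, if_pos hT]
    · have h2' : PySem.Str.isIn "(" x = false := by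
        revert h2; cases PySem.Str.isIn "(" x <;> simp
      by_cases h3 : PySem.Str.isIn "<" x = true
      · have hbrk : brkA x = "" := by
          simp only [brkA]
          rw [h1', if_neg hnft, h2', if_neg hnft, if_pos h3,
              bracketStep_empty _ _ _ (by decide) (by decide)]
        have hany : (["{", "(", "<"].any (fun c => PySem.Str.isIn c x)) = true := by
          simp only [List.any_cons, List.any_nil, h3, Bool.or_true, Bool.or_false]
        rw [cleanA, cleanB, hbrk, restA_empty, hany, if_pos hT]
      · have h3' : PySem.Str.isIn "<" x = false := by
          revert h3; cases PySem.Str.isIn "<" x <;> simp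
        have hbrk : brkA x = x := by
          simp only [brkA]
          rw [h1', if_neg hnft, h2', if_neg hnft, h3', if_neg hnft]
        have hany : (["{", "(", "<"].any (fun c => PySem.Str.isIn c x)) = false := by
          simp only [List.any_cons, List.any_nil, h1', h2', h3', Bool.or_false]
        rw [cleanA, cleanB, hbrk, hany, if_neg hnft, restA_eq_restB]

theorem step_eq (st : List String × List String) (x : String) (h : st.1.length ≤ 6) :
    loopA st x = loopB st x ∧ (loopB st x).1.length ≤ 6 := by
  simp only [loopA, loopB, clean_eq x]
  by_cases hcond : cleanB x ≠ "" ∧ cleanB x ∉ st.1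
  · rw [if_pos hcond, if_pos hcond]
    have hmem : (if st.1.length > 5 then st.1.tail ++ [cleanB x] else st.1 ++ [cleanB x])
        = PySem.List.slice (st.1 ++ [cleanB x]) (some (-6)) none := by
      rw [PySem.List.slice_some_none, PySem.List.clampIdx_neg_ofNat _ 6 (by norm_num)]
      by_cases hl : st.1.length > 5
      · have h6 : st.1.length = 6 := by omega
        rw [if_pos hl, show (st.1 ++ [cleanB x]).length - 6 = 1 from by simp [h6],
            List.drop_append_of_le_length (by omega), List.drop_one]
      · rw [if_neg hl, show (st.1 ++ [cleanB x]).length - 6 = 0 from by simp; omega,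
            List.drop_zero]
    constructor
    · rw [hmem]
    · rw [← hmem]
      by_cases hl : st.1.length > 5
      · rw [if_pos hl]
        simp
        omega
      · rw [if_neg hl]
        simp
        omega
  · rw [if_neg hcond, if_neg hcond]
    exact ⟨rfl, h⟩

theorem fold_eq : ∀ (xs : List String) (st : List String × List String), st.1.length ≤ 6 →
    xs.foldl loopA st = xs.foldl loopB st := by
  intro xs
  induction xs with
  | nil => intro st _; simp only [List.foldl_nil]
  | cons x t ih =>
    intro st h
    obtain ⟨heq, hlen⟩ := step_eq st x h
    simp only [List.foldl_cons]
    rw [heq]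
    exact ih (loopB st x) hlen

-- ===== VERDICT (by name: the statement is the Claim_ definition above) =====
theorem clean_headline_spec : Claim_equal_clean_headline := by
  intro text_list _
  unfold Spec_clean_headline clean_headline clean_headline_alt
  rw [fold_eq text_list ([], []) (by simp)]
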